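-- pv_equiv track=rewrite | github.com/GH-Lim/AlgorithmPractice | problems/test4/02.py | solution
-- ===== SOURCE A (Python) =====
-- def solution(answer_sheet, sheets):
--     ans_len = len(answer_sheet)
--     length = len(sheets)
--     answer = 0
--     for i in range(length):
--
--         for j in range(length):
--             if i == j: continue
--             cheats = 0
--             max_len = 0
--             temp_len = 0
--             for a in range(ans_len):
--                 if sheets[i][a] != answer_sheet[a] and sheets[i][a] == sheets[j][a]:
--                     temp_len += 1
--                     cheats += 1
--                 else:  # sheets[i][a] == answer_sheet[a]:
--                     max_len = max(max_len, temp_len)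
--                     temp_len = 0
--             max_len = max(max_len, temp_len)
--             answer = max(answer, cheats + max_len ** 2)
--
--     return answer
-- ===== SOURCE B (Python) =====
-- def solution(answer_sheet, sheets):
--     best = 0
--     m = len(sheets)
--     for i in range(m):
--         for j in range(i + 1, m):
--             # the cheat condition is symmetric in the two sheets, so unordered pairs suffice
--             mask = [x != a and x == y
--                     for a, x, y in zip(answer_sheet, sheets[i], sheets[j])]
--             falses = [k for k, b in enumerate(mask) if not b]
--             edges = [-1] + falses + [len(mask)]
--             runs = [b - a - 1 for a, b in zip(edges, edges[1:])]
--             best = max(best, (len(mask) - len(falses)) + max(runs) ** 2)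
--     return best
-- ===== Notes on version B (the rewrite author's own statement) =====
-- stated objective: alternative
-- what changed: B exploits that the cheat condition is symmetric in the two sheets, so it scores only unordered pairs i<j (half of A's ordered pairs); per pair, A's fused flush-on-false accumulator scan (cheats,max_len,temp_len) is replaced by arithmetic on the list of non-cheat positions: cheats = n - len(breaks) and the longest run = max gap between consecutive break positions with sentinels -1 and n.
import Mathlib
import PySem

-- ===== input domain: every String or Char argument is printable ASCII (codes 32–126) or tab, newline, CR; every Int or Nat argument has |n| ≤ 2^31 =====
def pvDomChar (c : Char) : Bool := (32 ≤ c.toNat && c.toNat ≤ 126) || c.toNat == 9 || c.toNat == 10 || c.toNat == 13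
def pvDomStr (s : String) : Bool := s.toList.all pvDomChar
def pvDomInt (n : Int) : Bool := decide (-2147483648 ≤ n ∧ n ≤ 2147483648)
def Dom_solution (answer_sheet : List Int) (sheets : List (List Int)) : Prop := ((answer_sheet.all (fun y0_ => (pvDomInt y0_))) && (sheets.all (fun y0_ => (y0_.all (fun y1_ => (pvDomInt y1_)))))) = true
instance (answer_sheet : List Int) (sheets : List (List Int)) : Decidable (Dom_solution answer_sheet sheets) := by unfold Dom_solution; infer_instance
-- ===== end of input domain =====

-- B scores only unordered pairs i<j (the cheat condition is symmetric in the two sheets) and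
-- replaces A's fused flush-on-false accumulator scan by arithmetic on the list of non-cheat
-- positions (cheats = n - #breaks, longest run = max gap between consecutive breaks).


-- ===== PORT A =====
-- inner-loop body of A (state = (cheats, max_len, temp_len))
def pvStepA (ans si sj : List Int) (st : Int × Int × Int) (a : Int) : Int × Int × Int :=
  if PySem.List.pyGetD si a 0 != PySem.List.pyGetD ans a 0
      && PySem.List.pyGetD si a 0 == PySem.List.pyGetD sj a 0
  then (st.1 + 1, st.2.1, st.2.2 + 1)
  else (st.1, max st.2.1 st.2.2, 0)

def solution (answer_sheet : List Int) (sheets : List (List Int)) : Int :=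
  (PySem.List.pyRange 0 (sheets.length : Int) 1).foldl (fun answer i =>
    (PySem.List.pyRange 0 (sheets.length : Int) 1).foldl (fun answer j =>
      if i == j then answer
      else
        let st := (PySem.List.pyRange 0 (answer_sheet.length : Int) 1).foldl
          (pvStepA answer_sheet (PySem.List.pyGetD sheets i []) (PySem.List.pyGetD sheets j [])) (0, 0, 0)
        max answer (st.1 + (max st.2.1 st.2.2) ^ 2)) answer) 0

-- ===== PORT B =====
-- the cheat mask of a pair (zip truncates to the common length, as Python's zip does)
def pvMask (ans si sj : List Int) : List Bool :=
  (ans.zip (si.zip sj)).map (fun p => p.2.1 != p.1 && p.2.1 == p.2.2)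

-- [k for k, b in enumerate(mask) if not b]
def pvFalses (mask : List Bool) : List Int :=
  ((PySem.List.enumerate mask).filter (fun p => !p.2)).map (fun p => p.1)

-- loop body of B: breaks/edges/gaps arithmetic for one pair.
-- max(runs): runs is always nonempty (edges has ≥ 2 elements), so the .getD 0 default is never used
def pvPairScoreB (ans si sj : List Int) : Int :=
  let mask := pvMask ans si sj
  let falses := pvFalses mask
  let edges := -1 :: (falses ++ [(mask.length : Int)])
  let runs := (edges.zip (edges.drop 1)).map (fun p => p.2 - p.1 - 1)
  ((mask.length : Int) - (falses.length : Int)) + ((PySem.List.max? runs (fun x => x)).getD 0) ^ 2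

def solution_alt (answer_sheet : List Int) (sheets : List (List Int)) : Int :=
  (PySem.List.pyRange 0 (sheets.length : Int) 1).foldl (fun best i =>
    (PySem.List.pyRange (i + 1) (sheets.length : Int) 1).foldl (fun best j =>
      max best (pvPairScoreB answer_sheet
        (PySem.List.pyGetD sheets i []) (PySem.List.pyGetD sheets j []))) best) 0

-- ===== PRECONDITION & SPEC =====
-- A raises IndexError exactly when ≥ 2 sheets, a nonempty answer sheet and some sheet shorter
-- than the answer sheet; Pre_ excludes exactly those inputs (with ≤ 1 sheet no indexing happens,
-- and answer_sheet = [] makes the first disjunct vacuously true).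
def Pre_solution (answer_sheet : List Int) (sheets : List (List Int)) : Prop :=
  (∀ s ∈ sheets, answer_sheet.length ≤ s.length) ∨ sheets.length ≤ 1
instance (answer_sheet : List Int) (sheets : List (List Int)) : Decidable (Pre_solution answer_sheet sheets) := by unfold Pre_solution; infer_instance

def pvWitness_solution : List Int × List (List Int) := ([1, 2], [[1, 2], [3, 2]])

def Spec_solution (answer_sheet : List Int) (sheets : List (List Int)) (out : Int) : Prop := out = solution_alt answer_sheet sheets
instance (answer_sheet : List Int) (sheets : List (List Int)) (out : Int) : Decidable (Spec_solution answer_sheet sheets out) := by unfold Spec_solution; infer_instance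

-- ===== CLAIM (what is proved, stated in full; the proofs are below) =====
def Claim_equal_solution : Prop := ∀ (answer_sheet : List Int) (sheets : List (List Int)), Dom_solution answer_sheet sheets → Pre_solution answer_sheet sheets → Spec_solution answer_sheet sheets (solution answer_sheet sheets)

-- ===== LEMMAS AND PROOFS =====

-- A's inner-loop body, re-expressed on the boolean already looked up
def pvStepBool (st : Int × Int × Int) (b : Bool) : Int × Int × Int :=
  if b then (st.1 + 1, st.2.1, st.2.2 + 1) else (st.1, max st.2.1 st.2.2, 0)

-- A's index loop over range(ans_len) is the fold of pvStepBool over the mask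
lemma pvIndexFold_eq_maskFold (ans si sj : List Int) (h1 : ans.length ≤ si.length)
    (h2 : ans.length ≤ sj.length) (init : Int × Int × Int) :
    (PySem.List.pyRange 0 (ans.length : Int) 1).foldl (pvStepA ans si sj) init
      = (pvMask ans si sj).foldl pvStepBool init := by
  have hmap : (PySem.List.pyRange 0 (ans.length : Int) 1).map
      (fun a => PySem.List.pyGetD si a 0 != PySem.List.pyGetD ans a 0
        && PySem.List.pyGetD si a 0 == PySem.List.pyGetD sj a 0) = pvMask ans si sj := by
    apply List.ext_getElem
    · simp [pvMask, PySem.List.length_pyRange_one]; omega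
    · intro k hk1 hk2
      have hk : k < ans.length := by
        simpa [PySem.List.length_pyRange_one] using hk1
      have hsi : k < si.length := lt_of_lt_of_le hk h1
      have hsj : k < sj.length := lt_of_lt_of_le hk h2
      simp [pvMask, PySem.List.getElem_pyRange_one, PySem.List.pyGetD_natCast, hk, hsi, hsj]
  calc (PySem.List.pyRange 0 (ans.length : Int) 1).foldl (pvStepA ans si sj) init
      = ((PySem.List.pyRange 0 (ans.length : Int) 1).map
          (fun a => PySem.List.pyGetD si a 0 != PySem.List.pyGetD ans a 0
            && PySem.List.pyGetD si a 0 == PySem.List.pyGetD sj a 0)).foldl pvStepBool init := by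
        rw [List.foldl_map]; rfl
    _ = (pvMask ans si sj).foldl pvStepBool init := by rw [hmap]

-- the running-maximum state machine used as a stepping stone between A and the gaps
def pvRunStep (st : Int × Int) (b : Bool) : Int × Int :=
  let cur := if b then st.2 + 1 else 0
  (max st.1 cur, cur)

-- relating A's flush-on-false state to the running-maximum state, over the same mask
lemma pvStateLemma (l : List Bool) :
    ∀ (c m t best cur : Int), max m t = best → t = cur →
      (l.foldl pvStepBool (c, m, t)).1 = c + (l.count true : Int) ∧
      max (l.foldl pvStepBool (c, m, t)).2.1 (l.foldl pvStepBool (c, m, t)).2.2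
        = (l.foldl pvRunStep (best, cur)).1 := by
  induction l with
  | nil =>
    exact fun c m t best cur h1 h2 => ⟨by simp, by simpa using h1⟩
  | cons b l ih =>
    intro c m t best cur h1 h2
    cases b with
    | true =>
      have := ih (c + 1) m (t + 1) (max best (t + 1)) (t + 1) (by omega) rfl
      simpa [pvStepBool, pvRunStep, List.count_cons, h2, Int.add_comm,
        Int.add_left_comm, Int.add_assoc] using this
    | false =>
      have := ih c (max m t) 0 (max best 0) 0 (by omega) rfl
      simpa [pvStepBool, pvRunStep, List.count_cons, h1] using this

-- (first gap, remaining gaps) of a mask: the run lengths between consecutive false positions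
def pvGaps : List Bool → Int × List Int
  | [] => (0, [])
  | true :: l => ((pvGaps l).1 + 1, (pvGaps l).2)
  | false :: l => (0, (pvGaps l).1 :: (pvGaps l).2)

lemma pvGaps_nonneg (l : List Bool) :
    0 ≤ (pvGaps l).1 ∧ ∀ x ∈ (pvGaps l).2, 0 ≤ x := by
  induction l with
  | nil => simp [pvGaps]
  | cons b l ih =>
    cases b with
    | true => exact ⟨by have := ih.1; simp [pvGaps]; omega, by simpa [pvGaps] using ih.2⟩
    | false =>
      refine ⟨le_refl 0, ?_⟩
      intro x hx
      simp [pvGaps] at hx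
      rcases hx with h | h
      · omega
      · exact ih.2 x h

-- the running-maximum fold computes the max of the gaps
lemma pvRunFold (l : List Bool) :
    ∀ best cur : Int, 0 ≤ best → cur ≤ best →
      (l.foldl pvRunStep (best, cur)).1
        = (pvGaps l).2.foldl max (max best (cur + (pvGaps l).1)) := by
  induction l with
  | nil => intro best cur h1 h2; simp [pvGaps]; omega
  | cons b l ih =>
    intro best cur h1 h2
    cases b with
    | true =>
      have h := ih (max best (cur + 1)) (cur + 1) (by omega) (by omega)
      have e : max (max best (cur + 1)) (cur + 1 + (pvGaps l).1)
          = max best (cur + ((pvGaps l).1 + 1)) := by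
        have := (pvGaps_nonneg l).1; omega
      simpa [pvStepBool, pvRunStep, pvGaps, e] using h
    | false =>
      have h := ih (max best 0) 0 (by omega) (by omega)
      have hb : pvRunStep (best, cur) false = (max best 0, 0) := by simp [pvRunStep]
      calc (List.foldl pvRunStep (best, cur) (false :: l)).1
          = (List.foldl pvRunStep (max best 0, 0) l).1 := by rw [List.foldl_cons, hb]
        _ = (pvGaps l).2.foldl max (max (max best 0) (0 + (pvGaps l).1)) := h
        _ = (pvGaps (false :: l)).2.foldl max (max best (cur + (pvGaps (false :: l)).1)) := by
            simp only [pvGaps, List.foldl_cons]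
            congr 1
            have := (pvGaps_nonneg l).1
            omega

lemma pvEnum_shift (l : List Bool) (s : Int) :
    PySem.List.enumerate l s = (PySem.List.enumerate l 0).map (fun p => (p.1 + s, p.2)) := by
  induction l generalizing s with
  | nil => simp [PySem.List.enumerate_nil]
  | cons b l ih =>
    rw [PySem.List.enumerate_cons, PySem.List.enumerate_cons, ih (s + 1), ih (0 + 1)]
    simp [List.map_map]
    intro a
    exact ⟨fun _ => by ring, fun _ => by ring⟩

lemma pvFalses_cons (b : Bool) (l : List Bool) :
    pvFalses (b :: l) = (if b then [] else [0]) ++ (pvFalses l).map (· + 1) := by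
  unfold pvFalses
  rw [PySem.List.enumerate_cons, pvEnum_shift l (0 + 1)]
  cases b <;> simp [List.filter_map, List.map_map, Function.comp_def]

lemma pvFalses_len (l : List Bool) :
    (pvFalses l).length + l.count true = l.length := by
  induction l with
  | nil => simp [pvFalses, PySem.List.enumerate_nil]
  | cons b l ih =>
    rw [pvFalses_cons]
    cases b <;> (simp [List.count_cons]; try omega)

-- successive differences b - a - 1 over c :: es
def pvDiffs : Int → List Int → List Int
  | _, [] => []
  | c, e :: es => (e - c - 1) :: pvDiffs e es

lemma pvZipDiffs (c : Int) (es : List Int) :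
    ((c :: es).zip es).map (fun p => p.2 - p.1 - 1) = pvDiffs c es := by
  induction es generalizing c with
  | nil => simp [pvDiffs]
  | cons e es ih => simp [pvDiffs, ← ih e]

lemma pvDiffs_shift (c : Int) (es : List Int) :
    pvDiffs (c + 1) (es.map (· + 1)) = pvDiffs c es := by
  induction es generalizing c with
  | nil => simp [pvDiffs]
  | cons e es ih => simp [pvDiffs, ih e]; try omega

lemma pvDiffs_map_add_one (es : List Int) :
    pvDiffs (-1) (es.map (· + 1))
      = (match pvDiffs (-1) es with | [] => [] | h :: t => (h + 1) :: t) := by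
  cases es with
  | nil => simp [pvDiffs]
  | cons e es =>
    show pvDiffs (-1) ((e + 1) :: es.map (· + 1)) = _
    simp only [pvDiffs]
    rw [pvDiffs_shift e es]
    congr 1
    ring

lemma pvDiffs_falses (l : List Bool) :
    pvDiffs (-1) (pvFalses l ++ [(l.length : Int)]) = (pvGaps l).1 :: (pvGaps l).2 := by
  induction l with
  | nil => simp [pvFalses, PySem.List.enumerate_nil, pvDiffs, pvGaps]
  | cons b l ih =>
    rw [pvFalses_cons]
    have hlen : ((l.length + 1 : Nat) : Int) = (l.length : Int) + 1 := by push_cast; ring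
    cases b with
    | true =>
      simp only [List.length_cons, reduceIte, List.nil_append, List.append_assoc]
      rw [hlen,
        show (pvFalses l).map (· + 1) ++ [((l.length : Int) + 1)]
          = ((pvFalses l) ++ [(l.length : Int)]).map (· + 1) by simp,
        pvDiffs_map_add_one, ih]
      simp [pvGaps]
    | false =>
      simp only [List.length_cons, reduceIte, List.cons_append, List.nil_append, List.append_assoc]
      rw [hlen,
        show (pvFalses l).map (· + 1) ++ [((l.length : Int) + 1)]
          = ((pvFalses l) ++ [(l.length : Int)]).map (· + 1) by simp]
      show pvDiffs (-1) (0 :: ((pvFalses l ++ [(l.length : Int)]).map (· + 1))) = _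
      simp only [pvDiffs]
      rw [show (0 : Int) = -1 + 1 by ring, pvDiffs_shift, ih]
      simp [pvGaps]

-- B's per-pair expression as count-of-true plus squared max gap
lemma pvPairScoreB_unfold (ans si sj : List Int) :
    pvPairScoreB ans si sj
      = ((pvMask ans si sj).count true : Int)
        + ((pvGaps (pvMask ans si sj)).2.foldl max (pvGaps (pvMask ans si sj)).1) ^ 2 := by
  simp only [pvPairScoreB]
  rw [show ((-1 : Int) :: (pvFalses (pvMask ans si sj) ++ [((pvMask ans si sj).length : Int)])).drop 1
        = pvFalses (pvMask ans si sj) ++ [((pvMask ans si sj).length : Int)] from rfl]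
  rw [pvZipDiffs, pvDiffs_falses, PySem.List.max?_id_cons]
  simp only [Option.getD_some]
  have hf := pvFalses_len (pvMask ans si sj)
  congr 1
  omega

-- A's per-pair score equals B's, when both sheets are long enough
lemma pvScoreA_eq (ans si sj : List Int) (h1 : ans.length ≤ si.length)
    (h2 : ans.length ≤ sj.length) :
    (let st := (PySem.List.pyRange 0 (ans.length : Int) 1).foldl (pvStepA ans si sj) (0, 0, 0)
     st.1 + (max st.2.1 st.2.2) ^ 2) = pvPairScoreB ans si sj := by
  rw [pvIndexFold_eq_maskFold ans si sj h1 h2]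
  obtain ⟨hc, hm⟩ := pvStateLemma (pvMask ans si sj) 0 0 0 0 0 (by simp) rfl
  have hr := pvRunFold (pvMask ans si sj) 0 0 le_rfl le_rfl
  have hg := (pvGaps_nonneg (pvMask ans si sj)).1
  have hmax : max (0 : Int) (0 + (pvGaps (pvMask ans si sj)).1) = (pvGaps (pvMask ans si sj)).1 := by
    omega
  rw [pvPairScoreB_unfold]
  simp only [hc, hm, hr, hmax]
  ring

-- the cheat condition is symmetric in the two sheets
lemma pvMask_symm (ans si sj : List Int) : pvMask ans si sj = pvMask ans sj si := by
  induction ans generalizing si sj with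
  | nil => simp [pvMask]
  | cons a ans ih =>
    cases si with
    | nil => simp [pvMask, List.zip_nil_right, List.zip_nil_left]
    | cons x si =>
      cases sj with
      | nil => simp [pvMask, List.zip_nil_right, List.zip_nil_left]
      | cons y sj =>
        have htail := ih si sj
        simp only [pvMask, List.zip_cons_cons, List.map_cons] at *
        rw [htail]
        congr 1
        by_cases h : x = y
        · subst h; rfl
        · have h1 : (x == y) = false := beq_eq_false_iff_ne.mpr h
          have h2 : (y == x) = false := beq_eq_false_iff_ne.mpr (Ne.symm h)
          simp [h1, h2]

lemma pvScoreB_symm (ans si sj : List Int) :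
    pvPairScoreB ans si sj = pvPairScoreB ans sj si := by
  rw [pvPairScoreB_unfold, pvPairScoreB_unfold, pvMask_symm]

-- flattening a nested running-max loop over pairs into one fold over a pair list
lemma pvFlattenFold (l : List Int) (w : Int → List Int) (sc : Int → Int → Int) (init : Int) :
    l.foldl (fun acc i => (w i).foldl (fun acc2 j => max acc2 (sc i j)) acc) init
      = ((l.flatMap (fun i => (w i).map (fun j => (i, j)))).map
          (fun p => sc p.1 p.2)).foldl max init := by
  induction l generalizing init with
  | nil => rfl
  | cons i l ih =>
    simp only [List.foldl_cons, List.flatMap_cons, List.map_append, List.foldl_append,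
      List.map_map]
    rw [ih]
    congr 1
    rw [List.foldl_map]
    rfl

theorem solution_spec : Claim_equal_solution := by
  intro ans sheets _ hpre
  show solution ans sheets = solution_alt ans sheets
  rcases hpre with hlen | hsmall
  · -- every sheet is at least as long as the answer sheet
    have hmem : ∀ i : Int, i ∈ PySem.List.pyRange 0 (sheets.length : Int) 1 →
        ans.length ≤ (PySem.List.pyGetD sheets i []).length := by
      intro i hi
      have hb := PySem.List.mem_pyRange_one.mp hi
      have hb' : (0 : Int) ≤ i ∧ i < (sheets.length : Int) := by simpa using hb
      have hmem' : PySem.List.pyGetD sheets i [] ∈ sheets := by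
        rw [PySem.List.pyGetD_of_nonneg sheets ([] : List Int) hb'.1]
        have : i.toNat < sheets.length := by omega
        simp [this]
      exact hlen _ hmem'
    have hA : solution ans sheets
        = (((PySem.List.pyRange 0 (sheets.length : Int) 1).flatMap (fun i =>
            ((PySem.List.pyRange 0 (sheets.length : Int) 1).filter
              (fun j => !(i == j))).map (fun j => (i, j)))).map
            (fun p => pvPairScoreB ans (PySem.List.pyGetD sheets p.1 [])
              (PySem.List.pyGetD sheets p.2 []))).foldl max 0 := by
      have houter : solution ans sheets
          = (PySem.List.pyRange 0 (sheets.length : Int) 1).foldl (fun acc i =>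
              ((PySem.List.pyRange 0 (sheets.length : Int) 1).filter
                (fun j => !(i == j))).foldl (fun acc2 j =>
                  max acc2 (pvPairScoreB ans (PySem.List.pyGetD sheets i [])
                    (PySem.List.pyGetD sheets j []))) acc) 0 := by
        unfold solution
        apply PySem.List.foldl_congr_mem
        intro acc i hi
        rw [show (fun answer j =>
              if i == j then answer
              else
                let st := (PySem.List.pyRange 0 (ans.length : Int) 1).foldl
                  (pvStepA ans (PySem.List.pyGetD sheets i []) (PySem.List.pyGetD sheets j [])) (0, 0, 0)
                max answer (st.1 + (max st.2.1 st.2.2) ^ 2))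
            = (fun answer j =>
              if !(i == j) then
                (let st := (PySem.List.pyRange 0 (ans.length : Int) 1).foldl
                  (pvStepA ans (PySem.List.pyGetD sheets i []) (PySem.List.pyGetD sheets j [])) (0, 0, 0)
                 max answer (st.1 + (max st.2.1 st.2.2) ^ 2))
              else answer) from funext fun a => funext fun j => by cases h : i == j <;> simp [h]]
        rw [PySem.List.foldl_if_eq_foldl_filter]
        apply PySem.List.foldl_congr_mem
        intro acc2 j hj
        have hjmem : j ∈ PySem.List.pyRange 0 (sheets.length : Int) 1 := (List.mem_filter.mp hj).1
        have := pvScoreA_eq ans (PySem.List.pyGetD sheets i []) (PySem.List.pyGetD sheets j [])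
          (hmem i hi) (hmem j hjmem)
        simp only at this ⊢
        rw [this]
      rw [houter]
      exact pvFlattenFold (PySem.List.pyRange 0 (sheets.length : Int) 1)
        (fun i => (PySem.List.pyRange 0 (sheets.length : Int) 1).filter (fun j => !(i == j)))
        (fun i j => pvPairScoreB ans (PySem.List.pyGetD sheets i []) (PySem.List.pyGetD sheets j [])) 0
    have hB : solution_alt ans sheets
        = (((PySem.List.pyRange 0 (sheets.length : Int) 1).flatMap (fun i =>
            (PySem.List.pyRange (i + 1) (sheets.length : Int) 1).map (fun j => (i, j)))).map
            (fun p => pvPairScoreB ans (PySem.List.pyGetD sheets p.1 [])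
              (PySem.List.pyGetD sheets p.2 []))).foldl max 0 := by
      unfold solution_alt
      exact pvFlattenFold (PySem.List.pyRange 0 (sheets.length : Int) 1)
        (fun i => PySem.List.pyRange (i + 1) (sheets.length : Int) 1)
        (fun i j => pvPairScoreB ans (PySem.List.pyGetD sheets i []) (PySem.List.pyGetD sheets j [])) 0
    rw [hA, hB]
    set f : Int × Int → Int := fun p => pvPairScoreB ans (PySem.List.pyGetD sheets p.1 [])
      (PySem.List.pyGetD sheets p.2 []) with hf
    set PA : List (Int × Int) := (PySem.List.pyRange 0 (sheets.length : Int) 1).flatMap (fun i =>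
      ((PySem.List.pyRange 0 (sheets.length : Int) 1).filter
        (fun j => !(i == j))).map (fun j => (i, j))) with hPAdef
    set PB : List (Int × Int) := (PySem.List.pyRange 0 (sheets.length : Int) 1).flatMap (fun i =>
      (PySem.List.pyRange (i + 1) (sheets.length : Int) 1).map (fun j => (i, j))) with hPBdef
    have hPA : ∀ p : Int × Int, p ∈ PA ↔
        (0 ≤ p.1 ∧ p.1 < (sheets.length : Int) ∧ 0 ≤ p.2 ∧ p.2 < (sheets.length : Int) ∧ p.1 ≠ p.2) := by
      rintro ⟨p1, p2⟩
      simp only [hPAdef, List.mem_flatMap, List.mem_map, List.mem_filter,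
        PySem.List.mem_pyRange_one, Prod.mk.injEq, Bool.not_eq_eq_eq_not, Bool.not_true,
        beq_eq_false_iff_ne]
      constructor
      · rintro ⟨a, ⟨ha1, ha2⟩, b, ⟨⟨hb1, hb2⟩, hab⟩, rfl, rfl⟩
        exact ⟨ha1, ha2, hb1, hb2, hab⟩
      · rintro ⟨h1, h2, h3, h4, h5⟩
        exact ⟨p1, ⟨h1, h2⟩, p2, ⟨⟨h3, h4⟩, h5⟩, rfl, rfl⟩
    have hPB : ∀ p : Int × Int, p ∈ PB ↔
        (0 ≤ p.1 ∧ p.1 < p.2 ∧ p.2 < (sheets.length : Int)) := by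
      rintro ⟨p1, p2⟩
      simp only [hPBdef, List.mem_flatMap, List.mem_map, PySem.List.mem_pyRange_one,
        Prod.mk.injEq]
      constructor
      · rintro ⟨a, ⟨ha1, ha2⟩, b, ⟨hb1, hb2⟩, rfl, rfl⟩
        exact ⟨ha1, by omega, hb2⟩
      · rintro ⟨h1, h2, h3⟩
        exact ⟨p1, ⟨h1, by omega⟩, p2, ⟨by omega, h3⟩, rfl, rfl⟩
    have hsym : ∀ p : Int × Int, f p = f (p.2, p.1) := by
      intro p
      simp only [hf]
      exact pvScoreB_symm ans _ _
    apply le_antisymm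
    · rcases PySem.List.foldl_max_mem (PA.map f) 0 with h | h
      · rw [h]
        exact (PySem.List.le_foldl_max (PB.map f) 0).1
      · obtain ⟨p, hp, hfp⟩ := List.mem_map.mp h
        rw [← hfp]
        obtain ⟨h1, h2, h3, h4, h5⟩ := (hPA p).mp hp
        rcases lt_or_gt_of_ne h5 with hlt | hgt
        · exact (PySem.List.le_foldl_max (PB.map f) 0).2 _
            (List.mem_map_of_mem ((hPB p).mpr ⟨h1, hlt, h4⟩))
        · rw [hsym p]
          exact (PySem.List.le_foldl_max (PB.map f) 0).2 _
            (List.mem_map_of_mem ((hPB (p.2, p.1)).mpr ⟨h3, hgt, h2⟩))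
    · rcases PySem.List.foldl_max_mem (PB.map f) 0 with h | h
      · rw [h]
        exact (PySem.List.le_foldl_max (PA.map f) 0).1
      · obtain ⟨p, hp, hfp⟩ := List.mem_map.mp h
        rw [← hfp]
        obtain ⟨h1, h2, h3⟩ := (hPB p).mp hp
        exact (PySem.List.le_foldl_max (PA.map f) 0).2 _
          (List.mem_map_of_mem ((hPA p).mpr ⟨h1, by omega, by omega, h3, by omega⟩))
  · -- at most one sheet: both programs return 0
    cases sheets with
    | nil => rfl
    | cons s t =>
      cases t with
      | nil =>
        unfold solution solution_alt
        norm_num [PySem.List.pyRange_one_cons, PySem.List.pyRange_one_eq_nil]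
      | cons s2 t2 => simp at hsmall
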